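-- pv_equiv track=rewrite | github.com/0x00000000000000000000/Steganography-Project | scratch_1.py | modPixel
-- ===== SOURCE A (Python) =====
-- def genBinary(data):
--     # Function generates binary codes
--     list = []
--
--     for i in data:
--         list.append(format(ord(i), '08b'))
--     return list
--
-- def modPixel(pix, data):
--     #pixels are modified according to the binary list version of the encoded text/data
--     datalist = genBinary(data)
--     lengthdata = len(datalist)
--     imgdata = iter(pix)
--
--     for i in range(lengthdata):
--
--         # Taking 3 pixels at a time
--         pix = [value for value in imgdata.__next__()[:3] +
--                imgdata.__next__()[:3] +
--                imgdata.__next__()[:3]]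
--
--         # Pixel value are made odd for 1 and even for 0
--         for j in range(0, 8):
--             if (datalist[i][j] == '0') and (pix[j] % 2 != 0):
--
--                 if (pix[j] % 2 != 0):
--                     pix[j] -= 1
--
--             elif (datalist[i][j] == '1') and (pix[j] % 2 == 0):
--                 pix[j] -= 1
--
--         # Eighth pixel is used to check whether the generated encoded data needs to be read or not
--         if (i == lengthdata - 1):
--             if (pix[-1] % 2 == 0):
--                 pix[-1] -= 1
--         else:
--             if (pix[-1] % 2 != 0):
--                 pix[-1] -= 1
--
--         pix = tuple(pix)
--         yield pix[0:3]
--         yield pix[3:6]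
--         yield pix[6:9]
-- ===== SOURCE B (Python) =====
-- def modPixel(pix, data):
--     # Flat-stream staging: build the whole 9n-bit target parity string once,
--     # flatten the needed pixel channels into one stream, force parities in a
--     # single zip pass, then re-chunk into pixel triples.
--     n = len(data)
--     bits = ''.join(format(ord(c), '08b') + ('1' if i == n - 1 else '0')
--                    for i, c in enumerate(data))
--     flat = [pix[k][c] for k in range(3 * n) for c in range(3)]
--     new = [v - (v - int(b)) % 2 for b, v in zip(bits, flat)]
--     for i in range(0, len(new), 3):
--         yield tuple(new[i:i + 3])
-- ===== Notes on version B (the rewrite author's own statement) =====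
-- stated objective: alternative
-- what changed: B replaces A's per-character loop that mutates a 9-element pixel block under branch tests with a staged flat-stream pipeline: it concatenates all characters' 9-bit target parity strings (8 data bits plus the last-char flag) into one bit string, flattens the consumed pixels into one channel list, forces every parity in a single branch-free zip pass v - (v - int(b)) % 2, and re-chunks the result into triples.
import Mathlib
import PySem

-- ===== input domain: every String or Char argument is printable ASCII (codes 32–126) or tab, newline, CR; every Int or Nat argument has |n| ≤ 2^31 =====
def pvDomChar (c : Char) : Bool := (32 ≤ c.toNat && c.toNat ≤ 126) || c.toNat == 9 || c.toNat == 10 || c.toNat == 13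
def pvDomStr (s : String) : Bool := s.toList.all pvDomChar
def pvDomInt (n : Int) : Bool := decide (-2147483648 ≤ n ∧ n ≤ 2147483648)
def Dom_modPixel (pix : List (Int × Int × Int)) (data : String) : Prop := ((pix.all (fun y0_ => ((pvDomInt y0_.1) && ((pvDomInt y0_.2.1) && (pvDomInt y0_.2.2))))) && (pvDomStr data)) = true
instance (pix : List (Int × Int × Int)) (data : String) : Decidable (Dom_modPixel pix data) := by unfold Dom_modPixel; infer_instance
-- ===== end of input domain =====

-- B replaces A's per-character mutate-a-9-block loop by a staged flat-stream pipeline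
-- (one 9n-bit target string, one flat channel list, one branch-free zip pass, re-chunk);
-- objective: alternative. Equivalence is about the returned (yielded) sequence.

-- ===== PORT A =====
-- hand port of format(n, '08b') as a List Char (Python str = List Char here);
-- exact for n < 256 (every ord the admitted domain produces)
def pvFmt08b (n : Nat) : List Char :=
  (List.range 8).map (fun j => if (n >>> (7 - j)) % 2 = 1 then '1' else '0')

def genBinary (data : String) : List (List Char) :=
  data.toList.map (fun c => pvFmt08b c.toNat)

-- the inner 'for j in range(0, 8)' loop mutating the 9-element block
def pvInnerA (bits : List Char) (block : List Int) : List Int :=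
  (List.range 8).foldl (fun blk j =>
      if bits.getD j ' ' = '0' ∧ PySem.Int.mod (blk.getD j 0) 2 ≠ 0 then
        (if PySem.Int.mod (blk.getD j 0) 2 ≠ 0 then blk.set j (blk.getD j 0 - 1) else blk)
      else if bits.getD j ' ' = '1' ∧ PySem.Int.mod (blk.getD j 0) 2 = 0 then
        blk.set j (blk.getD j 0 - 1)
      else blk) block

-- the 9th-pixel fix-up (pix[-1] of the always-9-element block is index 8)
def pvNinthA (last : Bool) (block : List Int) : List Int :=
  if last then
    (if PySem.Int.mod (block.getD 8 0) 2 = 0 then block.set 8 (block.getD 8 0 - 1) else block)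
  else
    (if PySem.Int.mod (block.getD 8 0) 2 ≠ 0 then block.set 8 (block.getD 8 0 - 1) else block)

-- one iteration of A's outer loop: build the 9-element block, run the inner j-loop, do the
-- 9th-pixel fix-up, yield the three slices (getD indices are all < 9, exact)
def pvStepA (bits : List Char) (last : Bool) (q0 q1 q2 : Int × Int × Int) :
    List (Int × Int × Int) :=
  let block := pvNinthA last (pvInnerA bits
    [q0.1, q0.2.1, q0.2.2, q1.1, q1.2.1, q1.2.2, q2.1, q2.2.1, q2.2.2])
  [(block.getD 0 0, block.getD 1 0, block.getD 2 0),
   (block.getD 3 0, block.getD 4 0, block.getD 5 0),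
   (block.getD 6 0, block.getD 7 0, block.getD 8 0)]

-- A's 'for i in range(lengthdata)' consuming three pixels from the iterator per step
def modPixelGo (datalist : List (List Char)) (i n : Nat)
    (rest : List (Int × Int × Int)) : List (Int × Int × Int) :=
  match datalist, rest with
  | [], _ => []
  | bits :: ds, r0 :: r1 :: r2 :: rest' =>
      pvStepA bits (i == n - 1) r0 r1 r2 ++ modPixelGo ds (i + 1) n rest'
  | _ :: _, _ => []  -- iterator exhausted: StopIteration, excluded by Pre_modPixel

def modPixel (pix : List (Int × Int × Int)) (data : String) : List (Int × Int × Int) :=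
  let datalist := genBinary data
  modPixelGo datalist 0 datalist.length pix

-- ===== PORT B =====
-- int(b) for a single bit character (hand port, exact on digit chars '0'/'1')
def pvDigit (b : Char) : Int := (b.toNat : Int) - 48

-- the zip-pass formula v - (v - int(b)) % 2
def pvAdj (b : Char) (v : Int) : Int := v - PySem.Int.mod (v - pvDigit b) 2

-- p[c] on a 3-channel pixel (hand port of the inner subscript, exact for c in range(3))
def pvIdx3 (p : Int × Int × Int) (cidx : Int) : Int :=
  if cidx = 0 then p.1 else if cidx = 1 then p.2.1 else p.2.2

-- the chunk loop 'for i in range(0, len(new), 3): yield tuple(new[i:i+3])'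
-- (exact when the length is a multiple of 3, which holds inside Pre_modPixel)
def pvChunk3 : List Int → List (Int × Int × Int)
  | a :: b :: c :: rest => (a, b, c) :: pvChunk3 rest
  | _ => []

def modPixel_alt (pix : List (Int × Int × Int)) (data : String) : List (Int × Int × Int) :=
  let n := data.toList.length
  -- bits = ''.join(format(ord(c),'08b') + ('1' if i == n-1 else '0') for i, c in enumerate(data))
  let bits := (data.toList.zipIdx).flatMap
    (fun ci => pvFmt08b ci.1.toNat ++ [if ci.2 = n - 1 then '1' else '0'])
  -- flat = [pix[k][c] for k in range(3*n) for c in range(3)]; IndexError excluded by Pre_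
  let flat := (PySem.List.pyRange 0 (3 * n) 1).flatMap (fun k =>
    (PySem.List.pyRange 0 3 1).map (fun cidx =>
      pvIdx3 ((PySem.List.pyGet? pix k).getD (0, 0, 0)) cidx))
  -- new = [v - (v - int(b)) % 2 for b, v in zip(bits, flat)], then chunked
  pvChunk3 (List.zipWith pvAdj bits flat)

-- ===== PRECONDITION & SPEC =====
-- A raises (StopIteration→RuntimeError) when fewer than 3 pixels per character remain
def Pre_modPixel (pix : List (Int × Int × Int)) (data : String) : Prop :=
  3 * data.toList.length ≤ pix.length
instance (pix : List (Int × Int × Int)) (data : String) : Decidable (Pre_modPixel pix data) := by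
  unfold Pre_modPixel; infer_instance

def pvWitness_modPixel : (List (Int × Int × Int)) × String :=
  ([(10, 11, 12), (13, 14, 15), (16, 17, 18)], "A")

def Spec_modPixel (pix : List (Int × Int × Int)) (data : String) (out : List (Int × Int × Int)) : Prop := out = modPixel_alt pix data
instance (pix : List (Int × Int × Int)) (data : String) (out : List (Int × Int × Int)) : Decidable (Spec_modPixel pix data out) := by unfold Spec_modPixel; infer_instance

-- ===== CLAIM (what is proved, stated in full; the proofs are below) =====
def Claim_equal_modPixel : Prop := ∀ (pix : List (Int × Int × Int)) (data : String), Dom_modPixel pix data → Pre_modPixel pix data → Spec_modPixel pix data (modPixel pix data)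

-- ===== LEMMAS AND PROOFS =====

-- A's inner-loop body result on one index, as a value-level function
def pvUpd (c : Char) (v : Int) : Int :=
  if c = '0' ∧ PySem.Int.mod v 2 ≠ 0 then v - 1
  else if c = '1' ∧ PySem.Int.mod v 2 = 0 then v - 1
  else v

-- forcing parity to an Int bit, the value-level core of B's pvAdj
def pvAdjust (v b : Int) : Int := v - PySem.Int.mod (v - b) 2

-- the j-th character of format(m,'08b')
def pvBitChar (m j : Nat) : Char := if (m >>> (7 - j)) % 2 = 1 then '1' else '0'

theorem getD_set_self (xs : List Int) (i : Nat) (v : Int) (h : i < xs.length) :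
    (xs.set i v).getD i 0 = v := by
  rw [List.getD_eq_getElem _ 0 (by simpa using h)]; simp

theorem getD_set_ne (xs : List Int) (i j : Nat) (v : Int) (h : i ≠ j) :
    (xs.set i v).getD j 0 = xs.getD j 0 := by
  simp [List.getD, List.getElem?_set_ne h]

-- A's if-chain body equals a single set with pvUpd
theorem bodyA_eq (bits : List Char) (blk : List Int) (j : Nat) (h : j < blk.length) :
    (if bits.getD j ' ' = '0' ∧ PySem.Int.mod (blk.getD j 0) 2 ≠ 0 then
        (if PySem.Int.mod (blk.getD j 0) 2 ≠ 0 then blk.set j (blk.getD j 0 - 1) else blk)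
      else if bits.getD j ' ' = '1' ∧ PySem.Int.mod (blk.getD j 0) 2 = 0 then
        blk.set j (blk.getD j 0 - 1)
      else blk)
    = blk.set j (pvUpd (bits.getD j ' ') (blk.getD j 0)) := by
  unfold pvUpd
  split_ifs with h1 h2 h3 <;> try rfl
  · exact absurd h1.2 h2
  · rw [List.getD_eq_getElem _ 0 h]; exact (List.set_getElem_self h).symm

def pvSetFold (bits : List Char) : Nat → List Int → List Int
  | 0, blk => blk
  | k + 1, blk =>
      (pvSetFold bits k blk).set k (pvUpd (bits.getD k ' ') ((pvSetFold bits k blk).getD k 0))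

theorem length_pvSetFold (bits : List Char) (k : Nat) (blk : List Int) :
    (pvSetFold bits k blk).length = blk.length := by
  induction k with
  | zero => rfl
  | succ k ih => rw [pvSetFold, List.length_set]; exact ih

theorem innerA_eq_pvSetFold (bits : List Char) (k : Nat) (blk : List Int)
    (h : k ≤ blk.length) :
    (List.range k).foldl (fun blk j =>
      if bits.getD j ' ' = '0' ∧ PySem.Int.mod (blk.getD j 0) 2 ≠ 0 then
        (if PySem.Int.mod (blk.getD j 0) 2 ≠ 0 then blk.set j (blk.getD j 0 - 1) else blk)
      else if bits.getD j ' ' = '1' ∧ PySem.Int.mod (blk.getD j 0) 2 = 0 then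
        blk.set j (blk.getD j 0 - 1)
      else blk) blk = pvSetFold bits k blk := by
  induction k with
  | zero => rfl
  | succ k ih =>
      rw [List.range_succ, List.foldl_append, List.foldl_cons, List.foldl_nil,
        ih (Nat.le_of_succ_le h),
        bodyA_eq bits _ k (by rw [length_pvSetFold]; omega)]
      rfl

theorem getD_pvSetFold (bits : List Char) (k : Nat) (blk : List Int) (m : Nat)
    (h : k ≤ blk.length) :
    (pvSetFold bits k blk).getD m 0 =
      if m < k then pvUpd (bits.getD m ' ') (blk.getD m 0) else blk.getD m 0 := by
  induction k with
  | zero => simp [pvSetFold]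
  | succ k ih =>
      rw [pvSetFold]
      have hk : (pvSetFold bits k blk).length = blk.length := length_pvSetFold bits k blk
      by_cases hm : m = k
      · subst hm
        rw [getD_set_self _ _ _ (by omega), ih (by omega)]
        simp
      · rw [getD_set_ne _ _ _ _ (fun e => hm e.symm), ih (by omega)]
        by_cases h1 : m < k
        · simp [h1, Nat.lt_succ_of_lt h1]
        · have : ¬ m < k + 1 := by omega
          simp [h1, this]

-- scalar correspondence: A's branch result = the branch-free formula, for a 0/1 bit
theorem pvUpd_eq_pvAdjust (p : Prop) [Decidable p] (v : Int) :
    pvUpd (if p then '1' else '0') v = pvAdjust v (if p then 1 else 0) := by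
  unfold pvUpd pvAdjust
  rw [PySem.Int.mod_eq_emod_of_pos (b := 2) (by norm_num),
    PySem.Int.mod_eq_emod_of_pos (b := 2) (by norm_num)]
  split_ifs <;> simp_all <;> omega

-- B's pvAdj on a 0/1 bit character is the branch-free formula on the Int bit
theorem pvAdj_ifbit (p : Prop) [Decidable p] (v : Int) :
    pvAdj (if p then '1' else '0') v = pvAdjust v (if p then 1 else 0) := by
  have h1 : pvDigit '1' = 1 := by decide
  have h0 : pvDigit '0' = 0 := by decide
  unfold pvAdj pvAdjust
  split_ifs <;> simp [h0, h1]

-- A's 9th-pixel fix-up = the branch-free formula with the flag bit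
theorem ninth_eq_pvAdjust (f : Bool) (v : Int) :
    (if f = true then (if PySem.Int.mod v 2 = 0 then v - 1 else v)
     else (if PySem.Int.mod v 2 ≠ 0 then v - 1 else v))
    = pvAdjust v (if f = true then 1 else 0) := by
  unfold pvAdjust
  rw [PySem.Int.mod_eq_emod_of_pos (b := 2) (by norm_num),
    PySem.Int.mod_eq_emod_of_pos (b := 2) (by norm_num)]
  cases f <;> simp <;> split_ifs <;> omega

theorem pvInnerA_eq (bits : List Char) (blk : List Int) (h : 8 ≤ blk.length) :
    pvInnerA bits blk = pvSetFold bits 8 blk :=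
  innerA_eq_pvSetFold bits 8 blk h

-- pvNinthA leaves indices below 8 unchanged
theorem getD_pvNinthA_lt (f : Bool) (B : List Int) (m : Nat) (hm : m ≠ 8) :
    (pvNinthA f B).getD m 0 = B.getD m 0 := by
  unfold pvNinthA
  split_ifs <;> first
    | rfl
    | exact getD_set_ne _ 8 m _ (fun e => hm e.symm)

-- pvNinthA at index 8 is the branch-free formula on the flag bit
theorem getD_pvNinthA_eight (f : Bool) (B : List Int) (h8 : 8 < B.length) :
    (pvNinthA f B).getD 8 0 = pvAdjust (B.getD 8 0) (if f = true then 1 else 0) := by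
  rw [← ninth_eq_pvAdjust]
  unfold pvNinthA
  split_ifs <;> first
    | exact getD_set_self _ 8 _ h8
    | rfl

-- format(m,'08b') as an explicit 8-character list
theorem pvFmt08b_expand (m : Nat) :
    pvFmt08b m = [pvBitChar m 0, pvBitChar m 1, pvBitChar m 2, pvBitChar m 3,
      pvBitChar m 4, pvBitChar m 5, pvBitChar m 6, pvBitChar m 7] := by
  simp [pvFmt08b, pvBitChar, List.range_succ]

-- one character's block: A's step = B's nine pvAdj-adjusted channels, chunked
set_option maxHeartbeats 1000000 in
theorem stepA_eq (c : Char) (f : Bool) (q0 q1 q2 : Int × Int × Int) :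
    pvStepA (pvFmt08b c.toNat) f q0 q1 q2 =
      [(pvAdj (pvBitChar c.toNat 0) q0.1, pvAdj (pvBitChar c.toNat 1) q0.2.1,
        pvAdj (pvBitChar c.toNat 2) q0.2.2),
       (pvAdj (pvBitChar c.toNat 3) q1.1, pvAdj (pvBitChar c.toNat 4) q1.2.1,
        pvAdj (pvBitChar c.toNat 5) q1.2.2),
       (pvAdj (pvBitChar c.toNat 6) q2.1, pvAdj (pvBitChar c.toNat 7) q2.2.1,
        pvAdj (if f = true then '1' else '0') q2.2.2)] := by
  obtain ⟨a0, a1, a2⟩ := q0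
  obtain ⟨b0, b1, b2⟩ := q1
  obtain ⟨c0, c1, c2⟩ := q2
  unfold pvStepA
  dsimp only
  rw [pvInnerA_eq (pvFmt08b c.toNat) [a0, a1, a2, b0, b1, b2, c0, c1, c2] (by simp)]
  set B0 := pvSetFold (pvFmt08b c.toNat) 8 [a0, a1, a2, b0, b1, b2, c0, c1, c2] with hB0
  have hlenB0 : B0.length = 9 := by rw [hB0, length_pvSetFold]; rfl
  have hg := fun m => getD_pvSetFold (pvFmt08b c.toNat) 8
    [a0, a1, a2, b0, b1, b2, c0, c1, c2] m (by simp)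
  have h8 : B0.getD 8 0 = c2 := by rw [hB0, hg 8]; simp [List.getD]
  simp only [getD_pvNinthA_lt f B0 0 (by norm_num), getD_pvNinthA_lt f B0 1 (by norm_num),
    getD_pvNinthA_lt f B0 2 (by norm_num), getD_pvNinthA_lt f B0 3 (by norm_num),
    getD_pvNinthA_lt f B0 4 (by norm_num), getD_pvNinthA_lt f B0 5 (by norm_num),
    getD_pvNinthA_lt f B0 6 (by norm_num), getD_pvNinthA_lt f B0 7 (by norm_num),
    getD_pvNinthA_eight f B0 (by omega), h8]
  have hbit : ∀ m : Nat, m < 8 →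
      (pvFmt08b c.toNat).getD m ' ' = (if (c.toNat >>> (7 - m)) % 2 = 1 then '1' else '0') := by
    intro m hm
    simp [pvFmt08b, List.getD, hm]
  have hv : ∀ m : Nat, m < 8 →
      (B0.getD m 0) = pvUpd (if (c.toNat >>> (7 - m)) % 2 = 1 then '1' else '0')
        ([a0, a1, a2, b0, b1, b2, c0, c1, c2].getD m 0) := by
    intro m hm
    rw [hB0, hg m]
    simp only [hm, if_pos, hbit m hm]
  simp only [hv 0 (by norm_num), hv 1 (by norm_num), hv 2 (by norm_num),
    hv 3 (by norm_num), hv 4 (by norm_num), hv 5 (by norm_num),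
    hv 6 (by norm_num), hv 7 (by norm_num)]
  simp only [pvUpd_eq_pvAdjust]
  have hflag : pvAdj (if f = true then '1' else '0') c2 = pvAdjust c2 (if f = true then 1 else 0) :=
    pvAdj_ifbit (f = true) c2
  simp [pvBitChar, pvAdj_ifbit, hflag, List.getD]

-- the flat-stream pipeline on the tail, blockwise: A's recursion = B's chunked zip
theorem go_eq (cs : List Char) (i n : Nat) (pix rest : List (Int × Int × Int))
    (hr : rest = pix.drop (3 * i)) (hlen : 3 * i + 3 * cs.length ≤ pix.length) :
    modPixelGo (cs.map (fun c => pvFmt08b c.toNat)) i n rest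
    = pvChunk3 (List.zipWith pvAdj
        ((cs.zipIdx i).flatMap
          (fun ci => pvFmt08b ci.1.toNat ++ [if ci.2 = n - 1 then '1' else '0']))
        (((pix.drop (3 * i)).take (3 * cs.length)).flatMap
          (fun p => [p.1, p.2.1, p.2.2]))) := by
  induction cs generalizing i rest with
  | nil => rfl
  | cons c cs ih =>
      have h0 : 3 * i < pix.length := by simp at hlen; omega
      have h1 : 3 * i + 1 < pix.length := by simp at hlen; omega
      have h2 : 3 * i + 2 < pix.length := by simp at hlen; omega
      have hd : pix.drop (3 * i)
          = pix[3 * i] :: pix[3 * i + 1] :: pix[3 * i + 2] :: pix.drop (3 * i + 3) := by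
        rw [List.drop_eq_getElem_cons h0, List.drop_eq_getElem_cons h1,
          List.drop_eq_getElem_cons h2]
      rw [hr, hd]
      show pvStepA (pvFmt08b c.toNat) (i == n - 1) _ _ _
            ++ modPixelGo (cs.map (fun c => pvFmt08b c.toNat)) (i + 1) n (pix.drop (3 * i + 3))
          = _
      have hIH := ih (i + 1) (pix.drop (3 * (i + 1))) rfl (by simp at hlen ⊢; omega)
      have e : 3 * (i + 1) = 3 * i + 3 := by ring
      rw [e] at hIH
      rw [stepA_eq, hIH]
      have h3 : 3 * (c :: cs).length = 3 * cs.length + 3 := by simp; ring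
      rw [h3, List.zipIdx_cons, List.flatMap_cons, pvFmt08b_expand]
      simp only [List.take_succ_cons, List.flatMap_cons, List.cons_append, List.nil_append,
        List.zipWith_cons_cons]
      have hfc : (if (i == n - 1) = true then '1' else '0') = (if i = n - 1 then '1' else '0') := by
        by_cases h : i = n - 1 <;> simp [h]
      rw [hfc]
      simp [pvChunk3, pvFmt08b_expand]

-- B's indexed double comprehension equals the flattened take, when the indices are in range
theorem flat_eq (pix : List (Int × Int × Int)) (m : Nat) (h : m ≤ pix.length) :
    (PySem.List.pyRange 0 (m : Int) 1).flatMap (fun k =>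
        (PySem.List.pyRange 0 3 1).map (fun cidx =>
          pvIdx3 ((PySem.List.pyGet? pix k).getD (0, 0, 0)) cidx))
      = (pix.take m).flatMap (fun p => [p.1, p.2.1, p.2.2]) := by
  induction m with
  | zero => rfl
  | succ m ih =>
      have hrg : PySem.List.pyRange 0 ((m : Int) + 1) 1
          = PySem.List.pyRange 0 (m : Int) 1 ++ [(m : Int)] := by
        rw [PySem.List.pyRange_one_succ_right (by omega)]
      have hm : m < pix.length := by omega
      have htk : pix.take (m + 1) = pix.take m ++ [pix[m]] := by
        rw [List.take_add_one, List.getElem?_eq_getElem hm]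
        rfl
      have hget : (PySem.List.pyGet? pix ((m : Nat) : Int)).getD (0, 0, 0) = pix[m] := by
        rw [PySem.List.pyGet?_natCast, List.getElem?_eq_getElem hm]
        rfl
      push_cast [hrg, htk]
      rw [List.flatMap_append, List.flatMap_append, ih (by omega)]
      simp [PySem.List.pyRange, List.range_succ, pvIdx3, List.getElem?_eq_getElem hm]

-- ===== VERDICT (by name: the statement is the Claim_ definition above) =====
theorem modPixel_spec : Claim_equal_modPixel := by
  intro pix data _ hpre
  unfold Spec_modPixel modPixel modPixel_alt genBinary
  have hflat := flat_eq pix (3 * data.toList.length) (by simpa using hpre)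
  push_cast at hflat
  simp only [String.length_toList] at hflat
  have hgo := go_eq data.toList 0 data.toList.length pix pix (by simp)
    (by simpa using hpre)
  simpa [hflat] using hgo
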